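-- pv_equiv track=rewrite | github.com/Digiyang/discord-migrator | src/adapters/permissions/matrix.py | map_permissions
-- ===== SOURCE A (Python) =====
-- ADMIN = 100
--
-- MOD   = 50
--
-- USER  = 0
--
-- _ADMIN_BITS = (
--     1 << 3,   # ADMINISTRATOR
-- )
--
-- _MOD_BITS = (
--     1 << 1,   # KICK_MEMBERS
--     1 << 2,   # BAN_MEMBERS
--     1 << 4,   # MANAGE_CHANNELS
--     1 << 5,   # MANAGE_GUILD
--     1 << 13,  # MANAGE_MESSAGES
--     1 << 27,  # MANAGE_NICKNAMES
--     1 << 28,  # MANAGE_ROLES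
--     1 << 29,  # MANAGE_WEBHOOKS
-- )
--
-- def map_permissions(discord_perms: int) -> int:
--     """Map a Discord role permission bitfield to a Matrix power level."""
--     for bit in _ADMIN_BITS:
--         if discord_perms & bit:
--             return ADMIN
--     for bit in _MOD_BITS:
--         if discord_perms & bit:
--             return MOD
--     return USER
-- ===== SOURCE B (Python) =====
-- ADMIN = 100
-- MOD   = 50
-- USER  = 0
--
-- # level granted by each permission bit position
-- _LEVEL_BY_BIT = {
--     3: ADMIN,   # ADMINISTRATOR
--     1: MOD,     # KICK_MEMBERS
--     2: MOD,     # BAN_MEMBERS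
--     4: MOD,     # MANAGE_CHANNELS
--     5: MOD,     # MANAGE_GUILD
--     13: MOD,    # MANAGE_MESSAGES
--     27: MOD,    # MANAGE_NICKNAMES
--     28: MOD,    # MANAGE_ROLES
--     29: MOD,    # MANAGE_WEBHOOKS
-- }
--
-- def map_permissions(discord_perms: int) -> int:
--     """Map a Discord role permission bitfield to a Matrix power level."""
--     level = USER
--     for pos, lvl in _LEVEL_BY_BIT.items():
--         if (discord_perms >> pos) & 1:
--             level = max(level, lvl)
--     return level
-- ===== Notes on version B (the rewrite author's own statement) =====
-- stated objective: alternative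
-- what changed: Replaced the two staged early-return loops over mask constants by a single pass over a bit-position-to-level table that shifts each bit down, tests it, and accumulates the maximum granted level (priority emerges from max instead of loop order).
import Mathlib
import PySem

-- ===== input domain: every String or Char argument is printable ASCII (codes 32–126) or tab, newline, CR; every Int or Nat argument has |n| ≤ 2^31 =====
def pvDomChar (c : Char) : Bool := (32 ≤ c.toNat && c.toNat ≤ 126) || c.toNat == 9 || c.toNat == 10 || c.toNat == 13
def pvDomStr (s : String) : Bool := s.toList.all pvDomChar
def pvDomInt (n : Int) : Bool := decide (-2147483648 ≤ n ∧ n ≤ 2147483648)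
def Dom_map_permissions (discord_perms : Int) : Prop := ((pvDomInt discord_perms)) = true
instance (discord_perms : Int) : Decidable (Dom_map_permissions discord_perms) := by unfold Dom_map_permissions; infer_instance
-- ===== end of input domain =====

-- B replaces A's staged early-return loops by one pass over a bit-position→level table,
-- shifting each bit down and accumulating the maximum level (objective: alternative).

-- ===== PORT A =====
def pvADMIN : Int := 100
def pvMOD : Int := 50
def pvUSER : Int := 0

def pvAdminBits : List Int := [1 <<< 3]

def pvModBits : List Int :=
  [1 <<< 1, 1 <<< 2, 1 <<< 4, 1 <<< 5, 1 <<< 13, 1 <<< 27, 1 <<< 28, 1 <<< 29]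

-- the two for-loops with early return of a constant
def map_permissions (discord_perms : Int) : Int :=
  if pvAdminBits.any (fun bit => PySem.Int.band discord_perms bit != 0) then pvADMIN
  else if pvModBits.any (fun bit => PySem.Int.band discord_perms bit != 0) then pvMOD
  else pvUSER

-- ===== PORT B =====
-- the dict _LEVEL_BY_BIT as an association list in insertion order
def pvLevelByBit : List (Nat × Int) :=
  [(3, 100), (1, 50), (2, 50), (4, 50), (5, 50), (13, 50), (27, 50), (28, 50), (29, 50)]

-- the loop body: '(discord_perms >> pos) & 1' test, 'level = max(level, lvl)' update
def pvHit (discord_perms : Int) (pl : Nat × Int) : Bool :=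
  PySem.Int.band (discord_perms >>> pl.1) 1 != 0

def pvStep (discord_perms : Int) (level : Int) (pl : Nat × Int) : Int :=
  if pvHit discord_perms pl then max level pl.2 else level

-- the single for-loop with the max accumulator
def map_permissions_alt (discord_perms : Int) : Int :=
  pvLevelByBit.foldl (pvStep discord_perms) 0

-- ===== PRECONDITION & SPEC =====
def Spec_map_permissions (discord_perms : Int) (out : Int) : Prop := out = map_permissions_alt discord_perms
instance (discord_perms : Int) (out : Int) : Decidable (Spec_map_permissions discord_perms out) := by unfold Spec_map_permissions; infer_instance

-- ===== CLAIM (what is proved, stated in full; the proofs are below) =====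
def Claim_equal_map_permissions : Prop := ∀ (discord_perms : Int), Dom_map_permissions discord_perms → Spec_map_permissions discord_perms (map_permissions discord_perms)

-- ===== LEMMAS AND PROOFS =====

-- A's mask test and B's shift-and-test agree: n & (1 << p) ≠ 0 iff (n >> p) & 1 ≠ 0
theorem pv_bit_bridge (n : Int) (p : Nat) :
    (PySem.Int.band (n >>> p) 1 ≠ 0) ↔ (PySem.Int.band n (((2:Nat)^p : Nat) : Int) ≠ 0) := by
  cases n with
  | ofNat m =>
      have hs : (Int.ofNat m) >>> p = Int.ofNat (m >>> p) := rfl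
      rw [hs]
      obtain ⟨q, hq⟩ : ∃ q, m >>> p = q := ⟨_, rfl⟩
      rw [hq]
      have h1 : PySem.Int.band (Int.ofNat q) 1 = ((q &&& 1 : Nat) : Int) := by
        rw [show (Int.ofNat q) = ((q : Nat) : Int) from rfl,
            show (1:Int) = ((1:Nat):Int) from rfl, PySem.Int.band_natCast]
      have h2 : PySem.Int.band (Int.ofNat m) (((2:Nat)^p : Nat) : Int) = ((m &&& 2^p : Nat) : Int) := by
        rw [show (Int.ofNat m) = ((m : Nat) : Int) from rfl, PySem.Int.band_natCast]
      rw [h1, h2]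
      simp only [ne_eq, Nat.cast_eq_zero]
      rw [Nat.and_one_is_mod, Nat.and_two_pow, ← hq, Nat.shiftRight_eq_div_pow,
          Nat.testBit_eq_decide_div_mod_eq]
      by_cases hb : m / 2 ^ p % 2 = 1
      · simp [hb]
      · have : m / 2 ^ p % 2 = 0 := by omega
        simp [this]
  | negSucc m =>
      have hs : (Int.negSucc m) >>> p = Int.negSucc (m >>> p) := rfl
      rw [hs]
      obtain ⟨q, hq⟩ : ∃ q, m >>> p = q := ⟨_, rfl⟩
      rw [hq]
      have hneg : ∀ k : Nat, ¬ (0 ≤ Int.negSucc k) := fun k => Int.not_le.mpr (Int.negSucc_lt_zero k)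
      have e1 : (-(Int.negSucc q) - 1) = ((q : Nat) : Int) := by
        rw [Int.negSucc_eq]; ring
      have e2 : (-(Int.negSucc m) - 1) = ((m : Nat) : Int) := by
        rw [Int.negSucc_eq]; ring
      have h1 : PySem.Int.band (Int.negSucc q) 1 = ((1 - (1 &&& q) : Nat) : Int) := by
        rw [PySem.Int.band]
        rw [if_neg (hneg _), if_pos (by norm_num), e1]
        simp [Int.toNat_one]
      have h2 : PySem.Int.band (Int.negSucc m) (((2:Nat)^p : Nat) : Int)
          = (((2:Nat)^p - ((2:Nat)^p &&& m) : Nat) : Int) := by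
        rw [PySem.Int.band]
        rw [if_neg (hneg _), if_pos (by positivity), e2]
        simp
        rw [show ((2:Int)^p).toNat = (2:Nat)^p by rw [show (2:Int) = ((2:Nat):Int) from rfl, ← Nat.cast_pow, Int.toNat_natCast]]
      rw [h1, h2]
      simp only [ne_eq, Nat.cast_eq_zero]
      rw [Nat.and_comm ((2:Nat)^p) m, Nat.and_two_pow]
      rw [Nat.one_and_eq_mod_two, ← hq, Nat.shiftRight_eq_div_pow,
          Nat.testBit_eq_decide_div_mod_eq]
      have hp : 0 < (2:Nat)^p := Nat.two_pow_pos p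
      by_cases hb : m / 2 ^ p % 2 = 1
      · simp [hb]
      · have hb0 : m / 2 ^ p % 2 = 0 := by omega
        simp [hb0]

-- absorbing accumulator: if every level in the list is ≤ acc, the fold leaves acc unchanged
theorem pv_foldl_absorb (n : Int) (l : List (Nat × Int)) (acc : Int)
    (h : ∀ x ∈ l, x.2 ≤ acc) :
    l.foldl (pvStep n) acc = acc := by
  induction l with
  | nil => rfl
  | cons x l ih =>
      rw [List.foldl_cons]
      have hx : max acc x.2 = acc := max_eq_left (h x (List.mem_cons_self ..))
      have hrest : ∀ y ∈ l, y.2 ≤ acc := fun y hy => h y (List.mem_cons_of_mem _ hy)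
      by_cases hc : pvHit n x = true
      · rw [show pvStep n acc x = acc by rw [pvStep, if_pos hc, hx], ih hrest]
      · rw [show pvStep n acc x = acc by rw [pvStep, if_neg hc], ih hrest]

-- a fold over all-50 entries from 0 yields 50 iff some tested bit is set
theorem pv_foldl_fifty (n : Int) (l : List (Nat × Int)) (h : ∀ x ∈ l, x.2 = 50) :
    l.foldl (pvStep n) 0 = if l.any (pvHit n) then 50 else 0 := by
  induction l with
  | nil => rfl
  | cons x l ih =>
      have hx : x.2 = 50 := h x (List.mem_cons_self ..)
      have hrest : ∀ y ∈ l, y.2 = 50 := fun y hy => h y (List.mem_cons_of_mem _ hy)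
      rw [List.foldl_cons, List.any_cons]
      by_cases hc : pvHit n x = true
      · rw [show pvStep n 0 x = 50 by rw [pvStep, if_pos hc, hx]; norm_num]
        rw [pv_foldl_absorb n l 50 (fun y hy => le_of_eq (hrest y hy))]
        simp [hc]
      · rw [show pvStep n 0 x = 0 by rw [pvStep, if_neg hc]]
        rw [ih hrest]
        simp only [Bool.not_eq_true] at hc
        rw [show pvHit n x = false from hc]
        rw [Bool.false_or]

-- the pvHit test in terms of the band-with-one condition
theorem pv_hit_iff (n : Int) (p : Nat) (lvl : Int) :
    pvHit n (p, lvl) = true ↔ PySem.Int.band (n >>> p) 1 ≠ 0 := by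
  simp [pvHit]

-- ===== VERDICT (by name: the statement is the Claim_ definition above) =====
set_option maxHeartbeats 1000000 in
theorem map_permissions_spec : Claim_equal_map_permissions := by
  intro n _
  unfold Spec_map_permissions map_permissions map_permissions_alt pvADMIN pvMOD pvUSER
    pvAdminBits pvModBits pvLevelByBit
  have b3 : (PySem.Int.band (n >>> (3:Nat)) 1 ≠ 0) ↔ (PySem.Int.band n 8 ≠ 0) := by
    simpa using pv_bit_bridge n 3
  by_cases h3 : PySem.Int.band (n >>> (3:Nat)) 1 ≠ 0
  · -- admin bit set: both sides are 100
    have hA : PySem.Int.band n 8 ≠ 0 := b3.mp h3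
    rw [List.foldl_cons]
    rw [show pvStep n 0 (3, 100) = 100 by
      rw [pvStep, if_pos ((pv_hit_iff n 3 100).mpr h3)]; norm_num]
    rw [pv_foldl_absorb n
      [(1, 50), (2, 50), (4, 50), (5, 50), (13, 50), (27, 50), (28, 50), (29, 50)] 100 (by decide)]
    simp only [List.any_cons, List.any_nil, Bool.or_false, bne_iff_ne, ne_eq]
    rw [if_pos (by simpa using hA)]
  · -- admin bit clear: compare the mod tests
    rw [Decidable.not_not] at h3
    have hA : PySem.Int.band n 8 = 0 := by
      by_contra h
      exact absurd h3 (b3.mpr h)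
    rw [List.foldl_cons]
    rw [show pvStep n 0 (3, 100) = 0 by
      rw [pvStep, if_neg (by simp [pvHit, h3])]]
    rw [pv_foldl_fifty n
      [(1, 50), (2, 50), (4, 50), (5, 50), (13, 50), (27, 50), (28, 50), (29, 50)] (by decide)]
    have b1 : pvHit n (1, 50) = true ↔ PySem.Int.band n 2 ≠ 0 :=
      (pv_hit_iff n 1 50).trans (by simpa using pv_bit_bridge n 1)
    have b2 : pvHit n (2, 50) = true ↔ PySem.Int.band n 4 ≠ 0 :=
      (pv_hit_iff n 2 50).trans (by simpa using pv_bit_bridge n 2)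
    have b4 : pvHit n (4, 50) = true ↔ PySem.Int.band n 16 ≠ 0 :=
      (pv_hit_iff n 4 50).trans (by simpa using pv_bit_bridge n 4)
    have b5 : pvHit n (5, 50) = true ↔ PySem.Int.band n 32 ≠ 0 :=
      (pv_hit_iff n 5 50).trans (by simpa using pv_bit_bridge n 5)
    have b13 : pvHit n (13, 50) = true ↔ PySem.Int.band n 8192 ≠ 0 :=
      (pv_hit_iff n 13 50).trans (by simpa using pv_bit_bridge n 13)
    have b27 : pvHit n (27, 50) = true ↔ PySem.Int.band n 134217728 ≠ 0 :=
      (pv_hit_iff n 27 50).trans (by simpa using pv_bit_bridge n 27)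
    have b28 : pvHit n (28, 50) = true ↔ PySem.Int.band n 268435456 ≠ 0 :=
      (pv_hit_iff n 28 50).trans (by simpa using pv_bit_bridge n 28)
    have b29 : pvHit n (29, 50) = true ↔ PySem.Int.band n 536870912 ≠ 0 :=
      (pv_hit_iff n 29 50).trans (by simpa using pv_bit_bridge n 29)
    simp only [List.any_cons, List.any_nil, Bool.or_false, Bool.or_eq_true, bne_iff_ne, ne_eq]
    rw [if_neg (by simpa using hA)]
    have hnum : ∀ k : Nat, ((1 <<< k : Nat) : Int) = ((2:Int))^k := by
      intro k; rw [Nat.shiftLeft_eq, Nat.one_mul]; push_cast; ring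
    rw [hnum, hnum, hnum, hnum, hnum, hnum, hnum, hnum]
    norm_num
    have key := or_congr b1.symm (or_congr b2.symm (or_congr b4.symm (or_congr b5.symm
      (or_congr b13.symm (or_congr b27.symm (or_congr b28.symm b29.symm))))))
    exact if_congr key rfl rfl
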